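-- pv_equiv track=rewrite | github.com/syurskyi/Algorithms_and_Data_Structure | _algorithms_challenges/leetcode/LeetcodePythonProject/leetcode_0801_0850/LeetCode828_UniqueLetterString.py | uniqueLetterString
-- ===== SOURCE A (Python) =====
-- def uniqueLetterString(S):
--     """
--     :type S: str
--     :rtype: int
--     """
--     s = S
--     hashmap = {}
--     for i, c in enumerate(s):
--         if c in hashmap:
--             l = hashmap[c]
--         else:
--             l = []
--         l.append(i)
--         hashmap[c] = l
--     sumVal = 0
--     for c, l in hashmap.items():
--         for i in range(len(l)):
--             if i == 0:
--                 left = l[i]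
--             else:
--                 left = l[i]-l[i-1]-1
--             if i == len(l)-1:
--                 right = len(s)-l[i]-1
--             else:
--                 right = l[i+1]-l[i]-1
--             sumVal = (sumVal+1+left+right+left*right)%(10**9+7)
--     return sumVal
-- ===== SOURCE B (Python) =====
-- def uniqueLetterString(S):
--     MOD = 10**9 + 7
--     last = {}  # char -> (second-last, last) occurrence positions, conceptually initialized to (-1, -1)
--     total = 0
--     for i, c in enumerate(S):
--         k, j = last.get(c, (-1, -1))
--         total += (i - j) * (j - k)
--         last[c] = (j, i)
--     n = len(S)
--     for k, j in last.values():
--         total += (n - j) * (j - k)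
--     return total % MOD
-- ===== Notes on version B (the rewrite author's own statement) =====
-- stated objective: faster
-- what changed: Instead of building full per-character position lists and then an indexed inner loop with four branches and a per-step modulus, B makes a single pass keeping only each character's last two occurrence positions in a dict, adds (i-j)*(j-k) per step, flushes (n-j)*(j-k) per character at the end, and takes the modulus once.
import Mathlib
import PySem

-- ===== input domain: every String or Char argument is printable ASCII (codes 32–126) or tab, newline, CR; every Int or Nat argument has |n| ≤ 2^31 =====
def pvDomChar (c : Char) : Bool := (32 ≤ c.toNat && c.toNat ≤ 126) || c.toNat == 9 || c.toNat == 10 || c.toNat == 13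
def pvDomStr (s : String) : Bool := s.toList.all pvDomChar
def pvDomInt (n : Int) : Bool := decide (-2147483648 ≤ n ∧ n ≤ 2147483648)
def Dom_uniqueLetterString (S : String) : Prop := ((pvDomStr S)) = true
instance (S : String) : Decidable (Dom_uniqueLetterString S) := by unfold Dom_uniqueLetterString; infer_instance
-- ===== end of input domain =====

-- B replaces A's per-character full position lists and branching indexed inner loop by a single
-- pass keeping only each character's last two occurrences, with a per-character flush at the end.

-- ===== PORT A =====
def uniqueLetterString (S : String) : Int :=
  let s := S.toList
  let hashmap := (PySem.List.enumerate s).foldl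
    (fun (h : PySem.Dict Char (List Int)) (p : Int × Char) =>
      let l := if h.contains p.2 then h.getD p.2 [] else []
      h.insert p.2 (l ++ [p.1])) PySem.Dict.empty
  hashmap.items.foldl
    (fun sumVal (cl : Char × List Int) =>
      let l := cl.2
      (PySem.List.pyRange 0 (l.length : Int) 1).foldl
        (fun sumVal i =>
          let left := if i == 0 then PySem.List.pyGetD l i 0
            else PySem.List.pyGetD l i 0 - PySem.List.pyGetD l (i-1) 0 - 1
          let right := if i == (l.length : Int) - 1 then (s.length : Int) - PySem.List.pyGetD l i 0 - 1
            else PySem.List.pyGetD l (i+1) 0 - PySem.List.pyGetD l i 0 - 1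
          PySem.Int.mod (sumVal + 1 + left + right + left * right) (10^9+7)) sumVal) 0

-- ===== PORT B =====
def uniqueLetterString_alt (S : String) : Int :=
  let s := S.toList
  let st := (PySem.List.enumerate s).foldl
    (fun (st : PySem.Dict Char (Int × Int) × Int) (p : Int × Char) =>
      let kj := st.1.getD p.2 (-1, -1)
      (st.1.insert p.2 (kj.2, p.1), st.2 + (p.1 - kj.2) * (kj.2 - kj.1)))
    (PySem.Dict.empty, 0)
  let n : Int := (s.length : Int)
  let total := st.1.values.foldl (fun t kj => t + (n - kj.2) * (kj.2 - kj.1)) st.2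
  PySem.Int.mod total (10^9+7)

-- ===== PRECONDITION & SPEC =====
def Spec_uniqueLetterString (S : String) (out : Int) : Prop := out = uniqueLetterString_alt S
instance (S : String) (out : Int) : Decidable (Spec_uniqueLetterString S out) := by unfold Spec_uniqueLetterString; infer_instance

-- ===== CLAIM (what is proved, stated in full; the proofs are below) =====
def Claim_equal_uniqueLetterString : Prop := ∀ (S : String), Dom_uniqueLetterString S → Spec_uniqueLetterString S (uniqueLetterString S)

-- ===== LEMMAS AND PROOFS =====

-- positions (as Ints) at which character c occurs in t
def posl (c : Char) (t : List Char) : List Int :=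
  ((PySem.List.enumerate t).filter (fun p => p.2 == c)).map (·.1)

-- per-character contribution: sum over occurrences of (gap to previous)*(gap to next),
-- with `prev` the previous boundary and `n` the right boundary
def triSum (prev : Int) (l : List Int) (n : Int) : Int :=
  match l with
  | [] => 0
  | [p] => (p - prev) * (n - p)
  | p :: q :: ps => (p - prev) * (q - p) + triSum p (q :: ps) n

-- last two positions, chain form (B's dict entry)
def lt2 (k j : Int) (l : List Int) : Int × Int :=
  match l with
  | [] => (k, j)
  | p :: ps => lt2 j p ps

-- B's running sum contribution, chain form
def ps2 (k j : Int) (l : List Int) : Int :=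
  match l with
  | [] => 0
  | p :: ps => (p - j) * (j - k) + ps2 j p ps

-- A's term at index i of the position list l (prev = previous boundary)
def aterm (prev : Int) (l : List Int) (n : Int) (i : Nat) : Int :=
  let left := if i = 0 then l.getD 0 0 - prev - 1 else l.getD i 0 - l.getD (i-1) 0 - 1
  let right := if i = l.length - 1 then n - l.getD i 0 - 1 else l.getD (i+1) 0 - l.getD i 0 - 1
  1 + left + right + left * right

lemma lt2_append (l : List Int) : ∀ k j i, lt2 k j (l ++ [i]) = ((lt2 k j l).2, i) := by
  induction l with
  | nil => intro k j i; simp [lt2]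
  | cons p ps ih => intro k j i; simp [lt2, ih]

lemma ps2_append (l : List Int) : ∀ k j i,
    ps2 k j (l ++ [i]) = ps2 k j l + (i - (lt2 k j l).2) * ((lt2 k j l).2 - (lt2 k j l).1) := by
  induction l with
  | nil => intro k j i; simp [ps2, lt2]
  | cons p ps ih => intro k j i; simp [ps2, lt2, ih]; ring

lemma triSum_cons (j p : Int) (l : List Int) (n : Int) :
    triSum j (p :: l) n = (l.headD n - p) * (p - j) + triSum p l n := by
  cases l with
  | nil => simp [triSum]; try ring
  | cons q ps => simp [triSum]; try ring

lemma chain_triSum (l : List Int) : ∀ k j n,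
    ps2 k j l + (n - (lt2 k j l).2) * ((lt2 k j l).2 - (lt2 k j l).1)
      = (l.headD n - j) * (j - k) + triSum j l n := by
  induction l with
  | nil => intro k j n; simp [ps2, lt2, triSum]; try ring
  | cons p ps ih =>
      intro k j n
      simp only [ps2, lt2, List.headD_cons]
      rw [add_assoc, ih j p n, triSum_cons]
      try ring

lemma chain_triSum' (l : List Int) (n : Int) :
    ps2 (-1) (-1) l + (n - (lt2 (-1) (-1) l).2) * ((lt2 (-1) (-1) l).2 - (lt2 (-1) (-1) l).1)
      = triSum (-1) l n := by
  rw [chain_triSum]; ring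

-- A's indexed term sum equals the chain form
lemma aterm_shift (prev p : Int) (ps : List Int) (n : Int) (i : Nat) (h : i < ps.length) :
    aterm prev (p :: ps) n (i+1) = aterm p ps n i := by
  unfold aterm
  simp only [List.getD_cons_succ, List.length_cons, Nat.add_sub_cancel, Nat.succ_ne_zero,
    if_false]
  rcases i with _ | i
  · simp only [List.getD_cons_zero, Nat.zero_add, if_true, Nat.sub_zero]
    by_cases hl : ps.length = 1
    · simp [hl]
    · have h1 : ¬ (0 + 1 = ps.length) := by omega
      have h2 : ¬ (0 = ps.length - 1) := by omega
      simp [h1, h2]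
  · have h1 : ¬ (i + 1 = 0) := by omega
    simp only [h1, if_false, List.getD_cons_succ, Nat.add_sub_cancel]
    by_cases hl : i + 1 + 1 = ps.length
    · have h2 : i + 1 = ps.length - 1 := by omega
      have h3 : ps.length - 1 + 1 = ps.length := by omega
      simp [hl, h2, h3]
    · have h2 : ¬ (i + 1 = ps.length - 1) := by omega
      simp [hl, h2]

lemma aterm_sum (l : List Int) : ∀ prev n,
    ((List.range l.length).map (aterm prev l n)).sum = triSum prev l n := by
  induction l with
  | nil => intro prev n; simp [triSum]
  | cons p ps ih =>
      intro prev n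
      rw [List.length_cons, List.range_succ_eq_map]
      simp only [List.map_cons, List.sum_cons, List.map_map]
      have hshift : (List.range ps.length).map ((aterm prev (p :: ps) n) ∘ Nat.succ)
          = (List.range ps.length).map (aterm p ps n) := by
        apply List.map_congr_left
        intro i hi
        exact aterm_shift prev p ps n i (List.mem_range.mp hi)
      rw [hshift, ih p n]
      cases ps with
      | nil => simp [aterm, triSum]; ring
      | cons q ps' =>
          have h0 : aterm prev (p :: q :: ps') n 0 = (p - prev) * (q - p) := by
            unfold aterm
            have : ¬ (0 = (p :: q :: ps').length - 1) := by simp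
            simp [this]
            ring
          rw [h0]; rfl

-- fold with per-step Python mod = mod of the sum
lemma modfold {α : Type} (ts : List α) (f : α → Int) : ∀ acc, 0 ≤ acc → acc < 10^9+7 →
    ts.foldl (fun a t => PySem.Int.mod (a + f t) (10^9+7)) acc
      = PySem.Int.mod (acc + (ts.map f).sum) (10^9+7) := by
  induction ts with
  | nil =>
      intro acc h1 h2
      simp only [List.foldl_nil, List.map_nil, List.sum_nil, add_zero]
      rw [PySem.Int.mod_eq_emod_of_pos (by norm_num)]
      omega
  | cons t ts ih =>
      intro acc h1 h2
      simp only [List.foldl_cons, List.map_cons, List.sum_cons]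
      rw [ih _ (PySem.Int.mod_nonneg _ (by norm_num)) (PySem.Int.mod_lt _ (by norm_num))]
      rw [PySem.Int.mod_eq_emod_of_pos (by norm_num), PySem.Int.mod_eq_emod_of_pos (by norm_num),
          PySem.Int.mod_eq_emod_of_pos (by norm_num)]
      omega

-- A's dict items
lemma items_eq_keys_map {κ ν : Type} [BEq κ] [LawfulBEq κ] (d : PySem.Dict κ ν)
    (h : d.keys.Nodup) (dflt : ν) : d.items = d.keys.map (fun k => (k, d.getD k dflt)) := by
  simp only [PySem.Dict.keys, List.map_map]
  conv_lhs => rw [← List.map_id d.items]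
  apply List.map_congr_left
  intro p hp
  have := PySem.Dict.getD_of_mem_items (d := d) (k := p.1) (v := p.2) (by simpa using hp) h (d0 := dflt)
  simp [Function.comp, this]

lemma buildA_items (s : List Char) :
    ((PySem.List.enumerate s).foldl
      (fun (h : PySem.Dict Char (List Int)) (p : Int × Char) =>
        let l := if h.contains p.2 then h.getD p.2 [] else []
        h.insert p.2 (l ++ [p.1])) PySem.Dict.empty).items
    = (PySem.Set.ofList s).map (fun c => (c, posl c s)) := by
  have hfun : ((PySem.List.enumerate s).foldl
      (fun (h : PySem.Dict Char (List Int)) (p : Int × Char) =>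
        let l := if h.contains p.2 then h.getD p.2 [] else []
        h.insert p.2 (l ++ [p.1])) PySem.Dict.empty)
      = ((PySem.List.enumerate s).foldl
      (fun (h : PySem.Dict Char (List Int)) (p : Int × Char) =>
        h.modify p.2 [] (· ++ [p.1])) PySem.Dict.empty) := by
    apply PySem.List.foldl_congr_mem
    intro h p _
    by_cases hc : h.contains p.2
    · simp [hc]; rfl
    · have hc' : h.contains p.2 = false := by simpa using hc
      have hgd : h.getD p.2 [] = [] := PySem.Dict.getD_of_not_contains _ _ hc'
      simp only [hc', Bool.false_eq_true, if_false]
      show h.insert p.2 ([] ++ [p.1]) = h.insert p.2 (h.getD p.2 [] ++ [p.1])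
      rw [hgd]
  rw [hfun]
  have hkeys : ((PySem.List.enumerate s).foldl
      (fun (h : PySem.Dict Char (List Int)) (p : Int × Char) =>
        h.modify p.2 [] (· ++ [p.1])) PySem.Dict.empty).keys = PySem.Set.ofList s := by
    rw [PySem.Dict.keys_foldl_modify_key]
    simp [PySem.List.map_snd_enumerate, PySem.Set.update_nil_left, PySem.Dict.keys_empty]
  have hnodup := hkeys ▸ PySem.Set.nodup_ofList (xs := s)
  rw [items_eq_keys_map _ hnodup []]
  rw [hkeys]
  apply List.map_congr_left
  intro c _
  congr 1
  -- getD c [] = posl c s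
  have hswap : ((PySem.List.enumerate s).foldl
      (fun (h : PySem.Dict Char (List Int)) (p : Int × Char) =>
        h.modify p.2 [] (· ++ [p.1])) PySem.Dict.empty)
    = (((PySem.List.enumerate s).map (fun p => (p.2, p.1))).foldl
      (fun (h : PySem.Dict Char (List Int)) (p : Char × Int) =>
        h.modify p.1 [] (· ++ [p.2])) PySem.Dict.empty) := by
    rw [List.foldl_map]
  rw [hswap, PySem.Dict.getD_foldl_modify_append]
  simp [PySem.Dict.getD_empty, posl, List.filter_map, List.map_map, Function.comp]
  simp [Function.comp_def]

-- B's loop invariant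
lemma posl_append (c c' : Char) (t : List Char) :
    posl c (t ++ [c']) = posl c t ++ (if c' = c then [(t.length : Int)] else []) := by
  unfold posl
  rw [PySem.List.enumerate_append]
  rw [List.filter_append, List.map_append]
  congr 1
  simp [PySem.List.enumerate_cons, PySem.List.enumerate_nil]
  split_ifs with h <;> simp [h]

lemma enum_filter_not_mem (c : Char) (t : List Char) (h : c ∉ t) : ∀ s : Int,
    (PySem.List.enumerate t s).filter (fun p => p.2 == c) = [] := by
  induction t with
  | nil => intro s; simp [PySem.List.enumerate_nil]
  | cons a t ih =>
      intro s
      simp only [List.mem_cons, not_or] at h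
      rw [PySem.List.enumerate_cons, List.filter_cons]
      have : ((s, a).2 == c) = false := by simpa using fun e => h.1 e.symm
      simp only [this, Bool.false_eq_true, if_false]
      exact ih h.2 _

lemma posl_not_mem (c : Char) (t : List Char) (h : c ∉ t) : posl c t = [] := by
  unfold posl
  rw [enum_filter_not_mem c t h 0]
  rfl

lemma sum_map_update {l : List Char} (hl : l.Nodup) (g g' : Char → Int) (c : Char) (δ : Int)
    (hne : ∀ c' ∈ l, c' ≠ c → g' c' = g c') (heq : g' c = g c + δ) :
    (l.map g').sum = (l.map g).sum + (if c ∈ l then δ else 0) := by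
  induction l with
  | nil => simp
  | cons a l ih =>
      simp only [List.nodup_cons] at hl
      by_cases hac : a = c
      · subst hac
        have : ∀ c' ∈ l, g' c' = g c' := by
          intro c' hc'
          exact hne c' (List.mem_cons_of_mem _ hc') (fun e => hl.1 (e ▸ hc'))
        simp only [List.map_cons, List.sum_cons, heq, List.map_congr_left this, List.mem_cons]
        simp
        ring
      · have := ih hl.2 (fun c' hc' => hne c' (List.mem_cons_of_mem _ hc'))
        simp only [List.map_cons, List.sum_cons, this, hne a (List.mem_cons_self) hac,
          List.mem_cons]
        have : (c = a ∨ c ∈ l) ↔ (c ∈ l) := by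
          constructor
          · rintro (e | h)
            · exact absurd e.symm hac
            · exact h
          · exact Or.inr
        rw [if_congr this rfl rfl]
        ring

lemma buildB_inv (s : List Char) :
    ((PySem.List.enumerate s).foldl
      (fun (st : PySem.Dict Char (Int × Int) × Int) (p : Int × Char) =>
        let kj := st.1.getD p.2 (-1, -1)
        (st.1.insert p.2 (kj.2, p.1), st.2 + (p.1 - kj.2) * (kj.2 - kj.1)))
      (PySem.Dict.empty, 0)).1.items
      = (PySem.Set.ofList s).map (fun c => (c, lt2 (-1) (-1) (posl c s)))
    ∧ ((PySem.List.enumerate s).foldl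
      (fun (st : PySem.Dict Char (Int × Int) × Int) (p : Int × Char) =>
        let kj := st.1.getD p.2 (-1, -1)
        (st.1.insert p.2 (kj.2, p.1), st.2 + (p.1 - kj.2) * (kj.2 - kj.1)))
      (PySem.Dict.empty, 0)).2
      = ((PySem.Set.ofList s).map (fun c => ps2 (-1) (-1) (posl c s))).sum := by
  induction s using List.reverseRecOn with
  | nil => constructor <;> simp [PySem.List.enumerate_nil, PySem.Set.ofList] <;> rfl
  | append_singleton t c ih =>
      obtain ⟨hitems, htot⟩ := ih
      set F := (fun (st : PySem.Dict Char (Int × Int) × Int) (p : Int × Char) =>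
        let kj := st.1.getD p.2 (-1, -1)
        (st.1.insert p.2 (kj.2, p.1), st.2 + (p.1 - kj.2) * (kj.2 - kj.1))) with hF
    -- name the state after the prefix
      set d := ((PySem.List.enumerate t).foldl F (PySem.Dict.empty, 0)).1 with hd
      set tot := ((PySem.List.enumerate t).foldl F (PySem.Dict.empty, 0)).2 with ht
      have henum : PySem.List.enumerate (t ++ [c]) 0
          = PySem.List.enumerate t 0 ++ [((0 : Int) + t.length, c)] := by
        rw [PySem.List.enumerate_append]
        simp [PySem.List.enumerate_cons, PySem.List.enumerate_nil]
      have hfold : (PySem.List.enumerate (t ++ [c])).foldl F (PySem.Dict.empty, 0)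
          = F (d, tot) ((0 : Int) + t.length, c) := by
        rw [show PySem.List.enumerate (t ++ [c]) = PySem.List.enumerate (t ++ [c]) 0 from rfl,
          henum, List.foldl_append]
        simp [hd, ht]
      have hkeys : d.keys = PySem.Set.ofList t := by
        show d.items.map (·.1) = _
        rw [hitems, List.map_map]
        simp [Function.comp_def]
      have hnodup : d.keys.Nodup := by rw [hkeys]; exact PySem.Set.nodup_ofList t
      have hgetD : d.getD c (-1, -1) = lt2 (-1) (-1) (posl c t) := by
        by_cases hc : c ∈ t
        · refine PySem.Dict.getD_of_mem_items _ ?_ hnodup _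
          rw [hitems]
          exact List.mem_map_of_mem ((PySem.Set.mem_ofList t c).mpr hc)
        · have h1 : d.contains c = false := by
            have : c ∉ d.keys := by
              rw [hkeys]; exact fun h => hc ((PySem.Set.mem_ofList t c).mp h)
            cases h2 : d.contains c
            · rfl
            · exact absurd ((PySem.Dict.contains_iff_mem_keys d c).mp h2) this
          rw [PySem.Dict.getD_of_not_contains _ _ h1, posl_not_mem c t hc]
          rfl
      constructor
      · rw [hfold]
        show (d.insert c ((d.getD c (-1,-1)).2, (0:Int) + t.length)).items = _
        rw [hgetD]
        by_cases hc : c ∈ t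
        · have hcont : d.contains c = true :=
            (PySem.Dict.contains_iff_mem_keys d c).mpr (by rw [hkeys]; exact (PySem.Set.mem_ofList t c).mpr hc)
          rw [PySem.Dict.items_insert_of_contains _ _ hcont, hitems]
          rw [PySem.Set.ofList_append, PySem.Set.update_cons, PySem.Set.update_nil,
            PySem.Set.add_of_mem ((PySem.Set.mem_ofList t c).mpr hc)]
          rw [List.map_map]
          apply List.map_congr_left
          intro c' hc'
          by_cases he : c' = c
          · subst he
            simp only [Function.comp_def, beq_self_eq_true, if_true]
            rw [posl_append, if_pos rfl, lt2_append]
            simp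
          · have : (c' == c) = false := by simpa using he
            simp only [Function.comp_def, this, Bool.false_eq_true, if_false]
            rw [posl_append, if_neg (fun e => he e.symm), List.append_nil]
        · have hcont : d.contains c = false := by
            cases h2 : d.contains c
            · rfl
            · exact absurd ((PySem.Dict.contains_iff_mem_keys d c).mp h2)
                (by rw [hkeys]; exact fun h => hc ((PySem.Set.mem_ofList t c).mp h))
          rw [PySem.Dict.items_insert_of_not_contains _ _ hcont, hitems]
          rw [PySem.Set.ofList_append, PySem.Set.update_cons, PySem.Set.update_nil,
            PySem.Set.add_of_not_mem (fun h => hc ((PySem.Set.mem_ofList t c).mp h))]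
          rw [List.map_append]
          congr 1
          · apply List.map_congr_left
            intro c' hc'
            have he : c' ≠ c := fun e => hc (e ▸ (PySem.Set.mem_ofList t c').mp hc')
            beta_reduce
            rw [posl_append, if_neg (fun e => he e.symm), List.append_nil]
          · simp only [List.map_cons, List.map_nil, posl_append, posl_not_mem c t hc]
            simp [lt2]
      · rw [hfold]
        show tot + (((0:Int) + t.length) - (d.getD c (-1,-1)).2)
            * ((d.getD c (-1,-1)).2 - (d.getD c (-1,-1)).1) = _
        rw [hgetD, htot]
        rw [PySem.Set.ofList_append, PySem.Set.update_cons, PySem.Set.update_nil]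
        by_cases hc : c ∈ t
        · rw [PySem.Set.add_of_mem ((PySem.Set.mem_ofList t c).mpr hc)]
          rw [sum_map_update (PySem.Set.nodup_ofList t)
              (fun c' => ps2 (-1) (-1) (posl c' t))
              (fun c' => ps2 (-1) (-1) (posl c' (t ++ [c]))) c
              ((((0:Int) + t.length) - (lt2 (-1) (-1) (posl c t)).2)
                * ((lt2 (-1) (-1) (posl c t)).2 - (lt2 (-1) (-1) (posl c t)).1))
              (fun c' _ he => by
                beta_reduce
                rw [posl_append, if_neg (fun e => he e.symm), List.append_nil])
              (by
                beta_reduce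
                rw [posl_append, if_pos rfl, ps2_append]
                ring)]
          rw [if_pos ((PySem.Set.mem_ofList t c).mpr hc)]
        · rw [PySem.Set.add_of_not_mem (fun h => hc ((PySem.Set.mem_ofList t c).mp h))]
          rw [List.map_append, List.sum_append]
          have h1 : (PySem.Set.ofList t).map (fun c' => ps2 (-1) (-1) (posl c' (t ++ [c])))
              = (PySem.Set.ofList t).map (fun c' => ps2 (-1) (-1) (posl c' t)) := by
            apply List.map_congr_left
            intro c' hc'
            have he : c' ≠ c := fun e => hc (e ▸ (PySem.Set.mem_ofList t c').mp hc')
            beta_reduce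
            rw [posl_append, if_neg (fun e => he e.symm), List.append_nil]
          rw [h1, posl_not_mem c t hc]
          simp [posl_append, posl_not_mem c t hc, ps2, lt2]


-- both sides reduce to mod (Σ_c triSum (-1) (posl c s) n)
-- A's inner loop over one position list
lemma innerA (n : Int) (l : List Int) : ∀ acc : Int, 0 ≤ acc → acc < 10^9+7 →
    (PySem.List.pyRange 0 (l.length : Int) 1).foldl
        (fun sumVal i =>
          let left := if i == 0 then PySem.List.pyGetD l i 0
            else PySem.List.pyGetD l i 0 - PySem.List.pyGetD l (i-1) 0 - 1
          let right := if i == (l.length : Int) - 1 then n - PySem.List.pyGetD l i 0 - 1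
            else PySem.List.pyGetD l (i+1) 0 - PySem.List.pyGetD l i 0 - 1
          PySem.Int.mod (sumVal + 1 + left + right + left * right) (10^9+7)) acc
      = PySem.Int.mod (acc + triSum (-1) l n) (10^9+7) := by
  intro acc h1 h2
  rw [PySem.List.pyRange_zero_natCast, List.foldl_map]
  have hcongr : (List.range l.length).foldl
      (fun sumVal (i : Nat) =>
        let left := if ((i : Int)) == 0 then PySem.List.pyGetD l i 0
          else PySem.List.pyGetD l i 0 - PySem.List.pyGetD l ((i : Int)-1) 0 - 1
        let right := if ((i : Int)) == (l.length : Int) - 1 then n - PySem.List.pyGetD l i 0 - 1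
          else PySem.List.pyGetD l ((i : Int)+1) 0 - PySem.List.pyGetD l i 0 - 1
        PySem.Int.mod (sumVal + 1 + left + right + left * right) (10^9+7)) acc
      = (List.range l.length).foldl
      (fun a (i : Nat) => PySem.Int.mod (a + aterm (-1) l n i) (10^9+7)) acc := by
    apply PySem.List.foldl_congr_mem
    intro a i hi
    have him : i < l.length := List.mem_range.mp hi
    unfold aterm
    by_cases h0 : i = 0
    · subst h0
      have el : ((0:Int) = (l.length:Int) - 1) ↔ ((0:Nat) = l.length - 1) := by omega
      simp only [beq_iff_eq, Nat.cast_zero, el, PySem.List.pyGetD_zero, if_true]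
      by_cases hlast : (0:Nat) = l.length - 1
      · simp only [if_pos hlast]; congr 1; ring
      · simp only [if_neg hlast, zero_add]
        rw [show ((1:Int)) = ((1:Nat):Int) from rfl, PySem.List.pyGetD_natCast]
        congr 1; ring
    · have hm1 : ((i:Int)) - 1 = ((i - 1 : Nat) : Int) := by omega
      have hp1 : ((i:Int)) + 1 = ((i + 1 : Nat) : Int) := by omega
      have el : (((i:Int)) = (l.length:Int) - 1) ↔ (i = l.length - 1) := by omega
      by_cases hlast : i = l.length - 1
      · simp only [beq_iff_eq, Int.natCast_eq_zero, hm1, hp1, PySem.List.pyGetD_natCast, el,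
          if_neg h0, if_pos hlast]
        congr 1; ring
      · simp only [beq_iff_eq, Int.natCast_eq_zero, hm1, hp1, PySem.List.pyGetD_natCast, el,
          if_neg h0, if_neg hlast]
        congr 1; ring
  rw [hcongr, modfold (List.range l.length) (aterm (-1) l n) acc h1 h2, aterm_sum l (-1) n]

-- A's outer loop over the dict items
lemma outerA (n : Int) (items : List (Char × List Int)) : ∀ acc : Int, 0 ≤ acc → acc < 10^9+7 →
    items.foldl
      (fun sumVal (cl : Char × List Int) =>
        let l := cl.2
        (PySem.List.pyRange 0 (l.length : Int) 1).foldl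
          (fun sumVal i =>
            let left := if i == 0 then PySem.List.pyGetD l i 0
              else PySem.List.pyGetD l i 0 - PySem.List.pyGetD l (i-1) 0 - 1
            let right := if i == (l.length : Int) - 1 then n - PySem.List.pyGetD l i 0 - 1
              else PySem.List.pyGetD l (i+1) 0 - PySem.List.pyGetD l i 0 - 1
            PySem.Int.mod (sumVal + 1 + left + right + left * right) (10^9+7)) sumVal) acc
      = PySem.Int.mod (acc + (items.map (fun cl => triSum (-1) cl.2 n)).sum) (10^9+7) := by
  induction items with
  | nil =>
      intro acc h1 h2
      simp only [List.foldl_nil, List.map_nil, List.sum_nil, add_zero]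
      rw [PySem.Int.mod_eq_emod_of_pos (by norm_num)]
      omega
  | cons cl items ih =>
      intro acc h1 h2
      simp only [List.foldl_cons, List.map_cons, List.sum_cons]
      rw [innerA n cl.2 acc h1 h2]
      rw [ih _ (PySem.Int.mod_nonneg _ (by norm_num)) (PySem.Int.mod_lt _ (by norm_num))]
      rw [PySem.Int.mod_eq_emod_of_pos (by norm_num), PySem.Int.mod_eq_emod_of_pos (by norm_num),
          PySem.Int.mod_eq_emod_of_pos (by norm_num)]
      omega

lemma portA_eq (S : String) :
    uniqueLetterString S
      = PySem.Int.mod (((PySem.Set.ofList S.toList).map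
          (fun c => triSum (-1) (posl c S.toList) (S.toList.length : Int))).sum) (10^9+7) := by
  have hdef : uniqueLetterString S = ((PySem.List.enumerate S.toList).foldl
      (fun (h : PySem.Dict Char (List Int)) (p : Int × Char) =>
        let l := if h.contains p.2 then h.getD p.2 [] else []
        h.insert p.2 (l ++ [p.1])) PySem.Dict.empty).items.foldl
      (fun sumVal (cl : Char × List Int) =>
        let l := cl.2
        (PySem.List.pyRange 0 (l.length : Int) 1).foldl
          (fun sumVal i =>
            let left := if i == 0 then PySem.List.pyGetD l i 0
              else PySem.List.pyGetD l i 0 - PySem.List.pyGetD l (i-1) 0 - 1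
            let right := if i == (l.length : Int) - 1 then (S.toList.length : Int) - PySem.List.pyGetD l i 0 - 1
              else PySem.List.pyGetD l (i+1) 0 - PySem.List.pyGetD l i 0 - 1
            PySem.Int.mod (sumVal + 1 + left + right + left * right) (10^9+7)) sumVal) 0 := rfl
  rw [hdef, buildA_items, outerA (S.toList.length : Int) _ 0 le_rfl (by norm_num), List.map_map]
  simp [Function.comp_def]

lemma portB_eq (S : String) :
    uniqueLetterString_alt S
      = PySem.Int.mod (((PySem.Set.ofList S.toList).map
          (fun c => triSum (-1) (posl c S.toList) (S.toList.length : Int))).sum) (10^9+7) := by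
  unfold uniqueLetterString_alt
  obtain ⟨h1, h2⟩ := buildB_inv S.toList
  show PySem.Int.mod (List.foldl _ _ _) _ = _
  rw [show (((PySem.List.enumerate S.toList).foldl
      (fun (st : PySem.Dict Char (Int × Int) × Int) (p : Int × Char) =>
        let kj := st.1.getD p.2 (-1, -1)
        (st.1.insert p.2 (kj.2, p.1), st.2 + (p.1 - kj.2) * (kj.2 - kj.1)))
      (PySem.Dict.empty, 0)).1.values)
    = ((PySem.List.enumerate S.toList).foldl
      (fun (st : PySem.Dict Char (Int × Int) × Int) (p : Int × Char) =>
        let kj := st.1.getD p.2 (-1, -1)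
        (st.1.insert p.2 (kj.2, p.1), st.2 + (p.1 - kj.2) * (kj.2 - kj.1)))
      (PySem.Dict.empty, 0)).1.items.map (·.2) from rfl]
  rw [h1, h2, PySem.List.foldl_add]
  congr 1
  simp only [List.map_map, Function.comp_def]
  rw [← List.sum_map_add]
  congr 1
  apply List.map_congr_left
  intro c _
  beta_reduce
  rw [← chain_triSum' (posl c S.toList) (S.toList.length : Int)]

-- ===== VERDICT (by name: the statement is the Claim_ definition above) =====
theorem uniqueLetterString_spec : Claim_equal_uniqueLetterString := by
  intro S _
  unfold Spec_uniqueLetterString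
  rw [portA_eq, portB_eq]
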